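-- pv_equiv track=rewrite | github.com/FundationOne/backtesting | tests/riskbands_test.py | generate_risk_band_scenarios
-- ===== SOURCE A (Python) =====
-- def generate_risk_band_scenarios(band_indices, max_length=7, total_combinations=1000):
--     scenarios = []
--     queue = [[band_indices[0]]]  # Start from the first band index
--
--     while queue and len(scenarios) < total_combinations:
--         path = queue.pop(0)
--         scenarios.append(path)
--         if len(path) < max_length:
--             current = path[-1]
--             for next_band in [current + 1, current -1]:
--                 if 0 <= next_band < len(band_indices):
--                     new_path = path + [next_band]
--                     queue.append(new_path)
--
--     return scenarios[:total_combinations]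
-- ===== SOURCE B (Python) =====
-- def _decode(code, length, start):
--     # Rebuild the walk from its step code: bit 0 of code is the LAST step
--     # (0 = +1, 1 = -1), higher bits earlier steps.
--     steps = []
--     for _ in range(length - 1):
--         steps.append(-1 if code & 1 else 1)
--         code //= 2
--     path = [start]
--     for step in reversed(steps):
--         path.append(path[-1] + step)
--     return path
--
--
-- def generate_risk_band_scenarios(band_indices, max_length=7, total_combinations=1000):
--     # Paths are kept implicitly as (code, last) integer pairs — bit i of code
--     # records the i-th +/-1 step — and decoded to a concrete list only when emitted.
--     n = len(band_indices)
--     start = band_indices[0]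
--     out = []
--     frontier = [(0, start)]
--     length = 1
--     while frontier and len(out) < total_combinations:
--         for code, _last in frontier:
--             out.append(_decode(code, length, start))
--         if length >= max_length:
--             break
--         nxt = []
--         for code, last in frontier:
--             if 0 <= last + 1 < n:
--                 nxt.append((code * 2, last + 1))
--             if 0 <= last - 1 < n:
--                 nxt.append((code * 2 + 1, last - 1))
--         frontier = nxt
--         length += 1
--     return out[:total_combinations]
-- ===== Notes on version B (the rewrite author's own statement) =====
-- stated objective: alternative
-- what changed: Replaced A's pop(0) queue of explicit path lists by a frontier of (code, last) integer pairs: each pending path is stored as the bit code of its +/-1 step sequence and decoded into a concrete list only when emitted, so no path lists are built or copied during the search.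
import Mathlib
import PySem

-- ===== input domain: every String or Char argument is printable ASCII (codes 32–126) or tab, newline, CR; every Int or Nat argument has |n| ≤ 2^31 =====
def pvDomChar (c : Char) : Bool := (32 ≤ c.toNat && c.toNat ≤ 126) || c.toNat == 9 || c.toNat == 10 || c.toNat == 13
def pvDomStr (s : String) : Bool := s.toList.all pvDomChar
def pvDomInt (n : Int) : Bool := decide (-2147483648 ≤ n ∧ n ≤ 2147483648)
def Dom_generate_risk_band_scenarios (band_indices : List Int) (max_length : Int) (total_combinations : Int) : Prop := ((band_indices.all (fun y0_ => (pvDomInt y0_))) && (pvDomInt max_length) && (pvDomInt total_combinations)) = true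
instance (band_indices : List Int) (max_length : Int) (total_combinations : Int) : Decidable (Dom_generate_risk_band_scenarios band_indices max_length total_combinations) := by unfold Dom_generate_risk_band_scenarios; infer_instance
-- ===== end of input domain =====

-- B replaces A's pop(0) queue of explicit path lists by a frontier of (code, last) integer
-- pairs — each path stored as the bit code of its ±1 steps and decoded only when emitted;
-- same return value on every non-empty band list.

-- ===== PORT A =====
-- children appended for a popped path: if len(path) < max_length, try current+1 then current-1
def pvChildA (n : Nat) (maxLen : Int) (path : List Int) : List (List Int) :=
  if (path.length : Int) < maxLen then
    let current := (PySem.List.pyGet? path (-1)).getD 0   -- path[-1]; paths are never empty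
    (([current + 1, current - 1]).filter (fun c => decide (0 ≤ c ∧ c < (n : Int)))).map
      (fun c => path ++ [c])
  else []

-- the while loop; each iteration appends exactly one scenario, so fuel = total_combinations.toNat
-- makes the recursion stop exactly where Python's `len(scenarios) < total_combinations` does
def pvLoopA (n : Nat) (maxLen tc : Int) : Nat → List (List Int) → List (List Int) → List (List Int)
  | 0, scen, _ => scen
  | fuel + 1, scen, queue =>
    match queue with
    | [] => scen
    | path :: rest =>
      if (scen.length : Int) < tc then
        pvLoopA n maxLen tc fuel (scen ++ [path]) (rest ++ pvChildA n maxLen path)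
      else scen

def generate_risk_band_scenarios (band_indices : List Int) (max_length : Int) (total_combinations : Int) : List (List Int) :=
  -- band_indices[0] raises IndexError on []; excluded by Pre_, default is irrelevant there
  let start := (PySem.List.pyGet? band_indices 0).getD 0
  PySem.List.slice
    (pvLoopA band_indices.length max_length total_combinations total_combinations.toNat [] [[start]])
    none (some total_combinations)

-- ===== PORT B =====
-- _decode's first loop: `for _ in range(length-1): steps.append(-1 if code & 1 else 1); code //= 2`
def pvDecodeSteps : Nat → Int → List Int
  | 0, _ => []
  | k + 1, code =>
    (if PySem.Int.band code 1 ≠ 0 then -1 else 1) :: pvDecodeSteps k (PySem.Int.floordiv code 2)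

-- _decode(code, length, start): rebuild the walk from its step code (bit 0 = LAST step)
def pvDecode (code length start : Int) : List Int :=
  let steps := pvDecodeSteps (length - 1).toNat code
  steps.reverse.foldl
    (fun path step => path ++ [(PySem.List.pyGet? path (-1)).getD 0 + step]) [start]

-- the body of B's `for code, last in frontier` expansion: two guarded appends per pair
def pvChildPair (n : Nat) (pr : Int × Int) : List (Int × Int) :=
  (if 0 ≤ pr.2 + 1 ∧ pr.2 + 1 < (n : Int) then [(pr.1 * 2, pr.2 + 1)] else []) ++
  (if 0 ≤ pr.2 - 1 ∧ pr.2 - 1 < (n : Int) then [(pr.1 * 2 + 1, pr.2 - 1)] else [])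

-- B's while loop; each iteration emits ≥ 1 scenario, so tc.toNat fuel reaches the count check
def pvLoopB (n : Nat) (maxLen tc start : Int) :
    Nat → List (List Int) → List (Int × Int) → Int → List (List Int)
  | 0, out, _, _ => out
  | fuel + 1, out, frontier, length =>
    match frontier with
    | [] => out
    | _ :: _ =>
      if (out.length : Int) < tc then
        let out' := out ++ frontier.map (fun pr => pvDecode pr.1 length start)
        if maxLen ≤ length then out'
        else pvLoopB n maxLen tc start fuel out' (frontier.flatMap (pvChildPair n)) (length + 1)
      else out

def generate_risk_band_scenarios_alt (band_indices : List Int) (max_length : Int) (total_combinations : Int) : List (List Int) :=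
  let start := (PySem.List.pyGet? band_indices 0).getD 0
  PySem.List.slice
    (pvLoopB band_indices.length max_length total_combinations start
      total_combinations.toNat [] [(0, start)] 1)
    none (some total_combinations)

-- ===== PRECONDITION & SPEC =====
-- A (and B) raise IndexError on band_indices = [] (band_indices[0]); excluded, nothing else is
def Pre_generate_risk_band_scenarios (band_indices : List Int) (max_length : Int) (total_combinations : Int) : Prop :=
  band_indices ≠ []
instance (band_indices : List Int) (max_length : Int) (total_combinations : Int) : Decidable (Pre_generate_risk_band_scenarios band_indices max_length total_combinations) := by unfold Pre_generate_risk_band_scenarios; infer_instance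

def pvWitness_generate_risk_band_scenarios : List Int × Int × Int := ([0, 1], 3, 5)

def Spec_generate_risk_band_scenarios (band_indices : List Int) (max_length : Int) (total_combinations : Int) (out : List (List Int)) : Prop := out = generate_risk_band_scenarios_alt band_indices max_length total_combinations
instance (band_indices : List Int) (max_length : Int) (total_combinations : Int) (out : List (List Int)) : Decidable (Spec_generate_risk_band_scenarios band_indices max_length total_combinations out) := by unfold Spec_generate_risk_band_scenarios; infer_instance

-- ===== CLAIM (what is proved, stated in full; the proofs are below) =====
def Claim_equal_generate_risk_band_scenarios : Prop := ∀ (band_indices : List Int) (max_length : Int) (total_combinations : Int), Dom_generate_risk_band_scenarios band_indices max_length total_combinations → Pre_generate_risk_band_scenarios band_indices max_length total_combinations → Spec_generate_risk_band_scenarios band_indices max_length total_combinations (generate_risk_band_scenarios band_indices max_length total_combinations)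

-- ===== LEMMAS AND PROOFS =====

-- proof-side abstraction: the explicit-path children of one path (A's pvChildA without the cap)
def pvChildB (n : Nat) (path : List Int) : List (List Int) :=
  let last := (PySem.List.pyGet? path (-1)).getD 0
  (([last + 1, last - 1]).filter (fun c => decide (0 ≤ c ∧ c < (n : Int)))).map
    (fun c => path ++ [c])

def pvExpandB (n : Nat) (level : List (List Int)) : List (List Int) :=
  level.flatMap (pvChildB n)

-- the full (unlimited) BFS pop-sequence of A's queue, fuel-bounded
def pvU (n : Nat) (maxLen : Int) : Nat → List (List Int) → List (List Int)
  | 0, _ => []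
  | _ + 1, [] => []
  | f + 1, p :: rest => p :: pvU n maxLen f (rest ++ pvChildA n maxLen p)

-- the full level-by-level concatenation, fuel-bounded (one fuel per level)
def pvV (n : Nat) (maxLen : Int) : Nat → Int → List (List Int) → List (List Int)
  | 0, _, _ => []
  | f + 1, depth, level =>
    level ++ (if depth < maxLen then pvV n maxLen f (depth + 1) (pvExpandB n level) else [])

-- the invariant tying B's (code, last) pairs at a given length to explicit paths
def pvRel (start length : Int) (pr : Int × Int) (p : List Int) : Prop :=
  pvDecode pr.1 length start = p ∧ (PySem.List.pyGet? p (-1)).getD 0 = pr.2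

theorem pvU_nil (n : Nat) (maxLen : Int) (f : Nat) : pvU n maxLen f [] = [] := by
  cases f <;> simp [pvU]

theorem pvV_nil (n : Nat) (maxLen : Int) (f : Nat) (d : Int) : pvV n maxLen f d [] = [] := by
  induction f generalizing d with
  | zero => simp [pvV]
  | succ f ih => simp [pvV, pvExpandB, ih]

-- A's limited loop is the tc-truncation of the unlimited pop-sequence
theorem pvLoopA_eq (n : Nat) (maxLen tc : Int) (fuel : Nat) :
    ∀ (queue scen : List (List Int)),
    pvLoopA n maxLen tc fuel scen queue
      = scen ++ (pvU n maxLen fuel queue).take (tc.toNat - scen.length) := by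
  induction fuel with
  | zero => intro queue scen; simp [pvLoopA, pvU]
  | succ f ih =>
    intro queue scen
    match queue with
    | [] => simp [pvLoopA, pvU]
    | p :: rest =>
      by_cases h : (scen.length : Int) < tc
      · have h1 : 1 ≤ tc.toNat - scen.length := by omega
        simp only [pvLoopA, pvU, if_pos h, ih]
        have he : tc.toNat - scen.length = (tc.toNat - (scen ++ [p]).length) + 1 := by
          simp; omega
        rw [he, List.take_succ_cons]
        simp [List.append_assoc]
      · have h0 : tc.toNat - scen.length = 0 := by omega
        simp [pvLoopA, pvU, if_neg h, h0]

-- decoding a left-shifted code appends one upward step to the decoded parent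
theorem pvDecode_mul_two (c L start : Int) (hL : 1 ≤ L) :
    pvDecode (c * 2) (L + 1) start
      = pvDecode c L start ++ [(PySem.List.pyGet? (pvDecode c L start) (-1)).getD 0 + 1] := by
  have hk : (L + 1 - 1).toNat = (L - 1).toNat + 1 := by omega
  have hm : PySem.Int.band (c * 2) 1 = 0 := by
    rw [PySem.Int.band_one, PySem.Int.mod_eq_zero_iff_dvd]
    exact ⟨c, by ring⟩
  have hd : PySem.Int.floordiv (c * 2) 2 = c := by
    rw [PySem.Int.floordiv_eq_iff_of_pos (by omega)]
    constructor <;> nlinarith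
  simp only [pvDecode, hk, pvDecodeSteps, hm, hd]
  simp [List.foldl_append]

-- decoding a left-shifted code plus one appends one downward step
theorem pvDecode_mul_two_add_one (c L start : Int) (hL : 1 ≤ L) :
    pvDecode (c * 2 + 1) (L + 1) start
      = pvDecode c L start ++ [(PySem.List.pyGet? (pvDecode c L start) (-1)).getD 0 - 1] := by
  have hk : (L + 1 - 1).toNat = (L - 1).toNat + 1 := by omega
  have hm : PySem.Int.band (c * 2 + 1) 1 ≠ 0 := by
    rw [PySem.Int.band_one, Ne, PySem.Int.mod_eq_zero_iff_dvd]
    omega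
  have hd : PySem.Int.floordiv (c * 2 + 1) 2 = c := by
    rw [PySem.Int.floordiv_eq_iff_of_pos (by omega)]
    constructor <;> nlinarith
  simp only [pvDecode, hk, pvDecodeSteps, if_pos hm, hd]
  simp [List.foldl_append, sub_eq_add_neg]

-- one pair's children decode to the explicit children of its path
theorem pvChildPair_rel (n : Nat) (start L : Int) (hL : 1 ≤ L) (pr : Int × Int) (p : List Int)
    (h : pvRel start L pr p) :
    List.Forall₂ (pvRel start (L + 1)) (pvChildPair n pr) (pvChildB n p) := by
  obtain ⟨hdec, hlast⟩ := h
  have hup : pvRel start (L + 1) (pr.1 * 2, pr.2 + 1) (p ++ [pr.2 + 1]) := by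
    refine ⟨?_, ?_⟩
    · rw [pvDecode_mul_two _ _ _ hL, hdec, hlast]
    · rw [PySem.List.pyGet?_neg_one_append_singleton]; rfl
  have hdn : pvRel start (L + 1) (pr.1 * 2 + 1, pr.2 - 1) (p ++ [pr.2 - 1]) := by
    refine ⟨?_, ?_⟩
    · rw [pvDecode_mul_two_add_one _ _ _ hL, hdec, hlast]
    · rw [PySem.List.pyGet?_neg_one_append_singleton]; rfl
  simp only [pvChildPair, pvChildB, hlast]
  by_cases h1 : 0 ≤ pr.2 + 1 ∧ pr.2 + 1 < (n : Int) <;>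
    by_cases h2 : 0 ≤ pr.2 - 1 ∧ pr.2 - 1 < (n : Int)
  · rw [if_pos h1, if_pos h2]
    simp only [List.filter_cons, List.filter_nil, h1, h2]
    exact .cons hup (.cons hdn .nil)
  · rw [if_pos h1, if_neg h2]
    simp only [List.filter_cons, List.filter_nil, h1, h2, decide_false]
    exact .cons hup .nil
  · rw [if_neg h1, if_pos h2]
    simp only [List.filter_cons, List.filter_nil, h1, h2, decide_false]
    exact .cons hdn .nil
  · rw [if_neg h1, if_neg h2]
    simp only [List.filter_cons, List.filter_nil, h1, h2, decide_false]
    exact .nil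

-- the whole frontier's children stay related to the expanded level
theorem pvFrontier_rel (n : Nat) (start L : Int) (hL : 1 ≤ L) :
    ∀ {fr : List (Int × Int)} {lv : List (List Int)},
    List.Forall₂ (pvRel start L) fr lv →
    List.Forall₂ (pvRel start (L + 1)) (fr.flatMap (pvChildPair n)) (pvExpandB n lv) := by
  intro fr lv h
  induction h with
  | nil => exact List.Forall₂.nil
  | cons h1 _ ih =>
    simp only [List.flatMap_cons, pvExpandB] at *
    exact List.rel_append (pvChildPair_rel n start L hL _ _ h1) ih

-- related frontiers decode exactly to the level
theorem pvRel_map (start L : Int) :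
    ∀ {fr : List (Int × Int)} {lv : List (List Int)},
    List.Forall₂ (pvRel start L) fr lv →
    fr.map (fun pr => pvDecode pr.1 L start) = lv := by
  intro fr lv h
  induction h with
  | nil => rfl
  | cons h1 _ ih => simp [List.map_cons, h1.1, ih]

-- B's limited loop agrees, after truncation, with the level concatenation of the decoded paths
theorem pvLoopB_eq (n : Nat) (maxLen tc start : Int) (fuel : Nat) :
    ∀ (fr : List (Int × Int)) (lv out : List (List Int)) (L : Int), 1 ≤ L →
    List.Forall₂ (pvRel start L) fr lv →
    (pvLoopB n maxLen tc start fuel out fr L).take tc.toNat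
      = (out ++ pvV n maxLen fuel L lv).take tc.toNat := by
  induction fuel with
  | zero => intro fr lv out L _ _; simp [pvLoopB, pvV]
  | succ f ih =>
    intro fr lv out L hL hrel
    match fr, lv, hrel with
    | [], [], _ => simp [pvLoopB, pvV_nil]
    | pr :: fr', p :: lv', hrel =>
      by_cases h : (out.length : Int) < tc
      · by_cases hd : maxLen ≤ L
        · have hnd : ¬ L < maxLen := by omega
          simp only [pvLoopB, pvV, if_pos h, if_pos hd, hnd, if_false, List.append_nil]
          rw [pvRel_map start L hrel]
        · have hlt : L < maxLen := by omega
          simp only [pvLoopB, pvV, if_pos h, if_neg hd, if_pos hlt]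
          rw [ih _ _ _ _ (by omega) (pvFrontier_rel n start L hL hrel),
              pvRel_map start L hrel, List.append_assoc]
      · have hle : tc.toNat ≤ out.length := by omega
        simp only [pvLoopB, pvV, if_neg h]
        rw [List.take_append, Nat.sub_eq_zero_of_le hle, List.take_zero, List.append_nil]

-- truncations of pvV do not depend on excess fuel
theorem pvV_take_mono (n : Nat) (maxLen : Int) :
    ∀ (f m : Nat) (d : Int) (L : List (List Int)), m ≤ f →
    (pvV n maxLen f d L).take m = (pvV n maxLen m d L).take m := by
  intro f
  induction f using Nat.strong_induction_on with
  | _ f ih =>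
    intro m d L hm
    match f, m with
    | 0, m => interval_cases m; rfl
    | f + 1, 0 => simp
    | f + 1, m + 1 =>
      match L with
      | [] => rw [pvV_nil, pvV_nil]
      | q :: L' =>
        by_cases hd : d < maxLen
        · simp only [pvV, if_pos hd]
          rw [List.take_append, List.take_append]
          congr 1
          have h1 : m + 1 - (q :: L').length ≤ f := by
            simp only [List.length_cons]; omega
          have h2 : m + 1 - (q :: L').length ≤ m := by
            simp only [List.length_cons]; omega
          rw [ih f (by omega) _ _ _ h1, ih m (by omega) _ _ _ h2]
        · simp [pvV, if_neg hd]

theorem pvChildB_len (n : Nat) (p q : List Int)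
    (hq : q ∈ pvChildB n p) : q.length = p.length + 1 := by
  unfold pvChildB at hq
  simp at hq
  obtain ⟨c, _, rfl⟩ := hq
  simp

-- splitting the queue-BFS: popping a block L emits L (truncated) and enqueues its children
theorem pvU_split (n : Nat) (maxLen : Int) :
    ∀ (L : List (List Int)) (f : Nat) (acc : List (List Int)),
    pvU n maxLen f (L ++ acc)
      = L.take f ++ pvU n maxLen (f - L.length) (acc ++ L.flatMap (pvChildA n maxLen)) := by
  intro L
  induction L with
  | nil => intro f acc; simp
  | cons p L' ih =>
    intro f acc
    match f with
    | 0 => simp [pvU]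
    | f + 1 =>
      simp only [List.cons_append, pvU]
      rw [List.append_assoc, ih]
      simp [List.append_assoc, Nat.succ_sub_succ]

-- on a level of uniform path length d, the queue-BFS enumerates the level concatenation
theorem pvU_eq_pvV (n : Nat) (maxLen : Int) :
    ∀ (f : Nat) (d : Int) (L : List (List Int)), (∀ p ∈ L, (p.length : Int) = d) →
    pvU n maxLen f L = (pvV n maxLen f d L).take f := by
  intro f
  induction f using Nat.strong_induction_on with
  | _ f ih =>
    intro d L hL
    match f with
    | 0 => cases L <;> rfl
    | f + 1 =>
      match L with
      | [] => rw [pvU_nil, pvV_nil]; rfl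
      | q :: L' =>
        have hsplit := pvU_split n maxLen (q :: L') (f + 1) []
        rw [List.append_nil] at hsplit
        rw [List.nil_append] at hsplit
        by_cases hd : d < maxLen
        · -- every child list equals pvChildB, so the enqueued block is pvExpandB
          have hexp : (q :: L').flatMap (pvChildA n maxLen) = pvExpandB n (q :: L') := by
            unfold pvExpandB
            apply List.flatMap_congr
            intro p hp
            have hlen : (p.length : Int) = d := hL p hp
            unfold pvChildA pvChildB
            rw [if_pos (by omega)]
          rw [hexp] at hsplit
          have hnext : ∀ p ∈ pvExpandB n (q :: L'), (p.length : Int) = d + 1 := by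
            intro p hp
            unfold pvExpandB at hp
            simp only [List.mem_flatMap] at hp
            obtain ⟨r, hr, hpr⟩ := hp
            have := pvChildB_len n r p hpr
            have := hL r hr
            omega
          by_cases hf : f + 1 ≤ (q :: L').length
          · -- the whole fuel is spent inside this level
            have h0 : f + 1 - (q :: L').length = 0 := by omega
            rw [h0, pvU] at hsplit
            rw [hsplit, List.append_nil]
            simp only [pvV, if_pos hd]
            rw [List.take_append, Nat.sub_eq_zero_of_le hf, List.take_zero, List.append_nil]
          · have hlen1 : 1 ≤ (q :: L').length := by simp
            have hrec : f + 1 - (q :: L').length ≤ f := by omega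
            rw [ih (f + 1 - (q :: L').length) (by omega) (d + 1) _ hnext] at hsplit
            rw [hsplit]
            simp only [pvV, if_pos hd]
            rw [List.take_append,
                List.take_of_length_le (by omega),
                pvV_take_mono n maxLen f (f + 1 - (q :: L').length) (d + 1) _ hrec]
        · -- depth cap reached: no path has children, the queue drains to exactly this level
          have hexp : (q :: L').flatMap (pvChildA n maxLen) = [] := by
            rw [List.flatMap_eq_nil_iff]
            intro p hp
            have hlen : (p.length : Int) = d := hL p hp
            unfold pvChildA
            rw [if_neg (by omega)]
          rw [hexp, pvU_nil, List.append_nil] at hsplit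
          rw [hsplit]
          simp [pvV, if_neg hd]

-- ===== VERDICT (by name: the statement is the Claim_ definition above) =====
theorem generate_risk_band_scenarios_spec : Claim_equal_generate_risk_band_scenarios := by
  intro bi ml tc _ _
  unfold Spec_generate_risk_band_scenarios
  unfold generate_risk_band_scenarios generate_risk_band_scenarios_alt
  by_cases htc : 0 ≤ tc
  · rw [PySem.List.slice_to _ htc, PySem.List.slice_to _ htc]
    set s := (PySem.List.pyGet? bi 0).getD 0 with hs
    have hstart : ∀ p ∈ ([[s]] : List (List Int)), (p.length : Int) = 1 := by
      intro p hp; simp at hp; simp [hp]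
    have hrel : List.Forall₂ (pvRel s 1) [((0 : Int), s)] [[s]] := by
      refine List.Forall₂.cons ⟨rfl, ?_⟩ List.Forall₂.nil
      rw [PySem.List.pyGet?_neg_one]; rfl
    rw [pvLoopA_eq, pvLoopB_eq bi.length ml tc s tc.toNat _ _ _ _ (by omega) hrel,
        List.nil_append, List.nil_append,
        pvU_eq_pvV bi.length ml tc.toNat 1 [[s]] hstart]
    simp [List.take_take]
  · have h0 : tc.toNat = 0 := by omega
    rw [h0]
    rfl
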